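-- pv_equiv track=rewrite | github.com/Griborii/anastasiya | dfa/regex_to_NFA.py | count
-- ===== SOURCE A (Python) =====
-- def count(st0):
--     dict2 = {}
--     spec_s = {'+', '*', '.', '(', ')'}
--     st = list(st0)
--     for i in range(len(st)):
--         elem = st[i]
--         if elem not in spec_s and elem not in dict2:
--             dict2[elem] = len(dict2)
--         if elem not in spec_s:
--             st[i] = str(dict2[elem])
--     ans = ""
--     for elem in st:
--         ans += elem
--     return (dict2, ans)
-- ===== SOURCE B (Python) =====
-- def count(st0):
--     spec_s = {'+', '*', '.', '(', ')'}
--     # rank each distinct non-special char by the position of its first occurrence: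
--     # sorting the set by str.index reproduces first-appearance order directly
--     uniq = sorted(set(st0) - spec_s, key=st0.index)
--     dict2 = {c: i for i, c in enumerate(uniq)}
--     # apply the table in one shot with str.translate
--     ans = st0.translate({ord(c): str(i) for i, c in enumerate(uniq)})
--     return (dict2, ans)
-- ===== Notes on version B (the rewrite author's own statement) =====
-- stated objective: alternative
-- what changed: Instead of A's single loop that mutates the list in place while growing the dict, B ranks the SET of non-special characters by sorting it on first-occurrence position (sorted(set(st0)-spec_s, key=st0.index)) and then rewrites the whole string in one shot with str.translate.
import Mathlib
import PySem

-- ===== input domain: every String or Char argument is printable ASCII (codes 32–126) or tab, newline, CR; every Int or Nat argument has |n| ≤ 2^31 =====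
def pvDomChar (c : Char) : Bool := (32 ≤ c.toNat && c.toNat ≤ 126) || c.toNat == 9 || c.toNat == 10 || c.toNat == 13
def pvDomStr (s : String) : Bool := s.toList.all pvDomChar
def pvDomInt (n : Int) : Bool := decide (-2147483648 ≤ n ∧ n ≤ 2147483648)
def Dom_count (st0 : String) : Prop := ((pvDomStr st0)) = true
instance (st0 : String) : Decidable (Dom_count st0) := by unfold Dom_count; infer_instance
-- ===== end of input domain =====

-- B replaces A's single mutate-in-place loop by: sort the SET of non-special chars by first
-- occurrence (str.index) to get the ranking, then apply it in one shot via str.translate;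
-- equal return value everywhere.

-- ===== PORT A =====
-- the literal set {'+','*','.','(',')'}; membership test on chars
def specA : List Char := ['+', '*', '.', '(', ')']

-- one step of A's loop: maybe extend dict2, then replace st[i] by str(dict2[elem]) (pieces kept
-- as List Char — str(n) is PySem.Int.toChars — and the final string assembled by String.ofList,
-- since Lean's own String.append is opaque to the kernel)
def stepA (p : PySem.Dict String Int × List (List Char)) (elem : Char) :
    PySem.Dict String Int × List (List Char) :=
  let dict2 :=
    if !specA.contains elem && !p.1.contains (String.ofList [elem]) then
      p.1.insert (String.ofList [elem]) (p.1.size : Int)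
    else p.1
  let piece :=
    if !specA.contains elem then
      PySem.Int.toChars (dict2.getD (String.ofList [elem]) 0)   -- dict2[elem]: the key is always present here
    else [elem]
  (dict2, p.2 ++ [piece])

def count (st0 : String) : (List (String × Int)) × String :=
  let st := st0.toList
  let res := st.foldl stepA (PySem.Dict.empty, [])
  -- ans = ""; for elem in st: ans += elem
  (res.1.items, String.ofList (res.2.foldl (fun a b => a ++ b) []))

-- ===== PORT B =====
def specB : PySem.Set Char := PySem.Set.ofList ['+', '*', '.', '(', ')']

def count_alt (st0 : String) : (List (String × Int)) × String :=
  let st := st0.toList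
  -- uniq = sorted(set(st0) - spec_s, key=st0.index)
  -- (the Python set's hash order is irrelevant: the key st0.index is injective on it,
  -- so the sorted result is the same list whatever order the set is enumerated in)
  let uniq := PySem.List.sorted (PySem.Set.diff (PySem.Set.ofList st) specB)
      (fun c => (PySem.List.index? st c).getD 0) false
  -- dict2 = {c: i for i, c in enumerate(uniq)}
  let dict2 := (PySem.List.enumerate uniq 0).foldl
      (fun (d : PySem.Dict String Int) p => d.insert (String.ofList [p.2]) p.1) PySem.Dict.empty
  -- {ord(c): str(i) for i, c in enumerate(uniq)}
  let trans := (PySem.List.enumerate uniq 0).foldl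
      (fun (d : PySem.Dict Nat (List Char)) p => d.insert p.2.toNat (PySem.Int.toChars p.1))
      PySem.Dict.empty
  -- st0.translate(trans): ported by hand — each char is looked up by its code point and
  -- replaced by the mapped string, chars absent from the table are kept (exact for this table)
  let ans := String.ofList ((st.map (fun c => trans.getD c.toNat [c])).flatten)
  (dict2.items, ans)

-- ===== PRECONDITION & SPEC =====
def Spec_count (st0 : String) (out : (List (String × Int)) × String) : Prop := out = count_alt st0
instance (st0 : String) (out : (List (String × Int)) × String) : Decidable (Spec_count st0 out) := by unfold Spec_count; infer_instance

-- ===== CLAIM (what is proved, stated in full; the proofs are below) =====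
def Claim_equal_count : Prop := ∀ (st0 : String), Dom_count st0 → Spec_count st0 (count st0)

-- ===== LEMMAS AND PROOFS =====

-- helper abbreviations used only by the proofs
def fns (c : Char) : Bool := !specA.contains c

def Kof (xs : List Char) : List Char := PySem.Set.ofList (xs.filter fns)

def keyOf (c : Char) : String := String.ofList [c]

def dOf (xs : List Char) : PySem.Dict String Int :=
  PySem.Dict.mk ((PySem.List.enumerate (Kof xs) 0).map (fun p => (keyOf p.2, p.1)))

def iOf (xs : List Char) (c : Char) : Int :=
  (((PySem.List.index? (Kof xs) c).getD 0 : Nat) : Int)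

def gOf (full : List Char) (c : Char) : List Char :=
  if fns c then PySem.Int.toChars (iOf full c) else [c]

theorem fns_false {c : Char} (h : ¬ fns c = true) : fns c = false := by
  revert h; cases fns c <;> simp

theorem keyOf_inj {c c' : Char} (h : keyOf c = keyOf c') : c = c' := by
  have h2 := congrArg String.toList h
  simp [keyOf] at h2
  exact h2

theorem keys_dOf (xs : List Char) : (dOf xs).keys = (Kof xs).map keyOf := by
  have h2 : ((PySem.List.enumerate (Kof xs) 0).map (·.2)).map keyOf = (Kof xs).map keyOf := by
    rw [PySem.List.map_snd_enumerate]
  simp only [dOf, PySem.Dict.keys, List.map_map] at *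
  simpa using h2

theorem nodup_keys_dOf (xs : List Char) : (dOf xs).keys.Nodup := by
  rw [keys_dOf]
  exact (PySem.Set.nodup_ofList _).map (fun a b h => keyOf_inj h)

theorem contains_dOf (xs : List Char) (c : Char) :
    (dOf xs).contains (keyOf c) = decide (c ∈ Kof xs) := by
  rw [PySem.Dict.contains_eq_decide_mem_keys, keys_dOf]
  by_cases h : c ∈ Kof xs
  · simp [h, List.mem_map]
    exact ⟨c, h, rfl⟩
  · simp [h, List.mem_map]
    intro a ha hk
    exact absurd (keyOf_inj hk ▸ ha) h

theorem mem_enum_iOf {xs : List Char} {c : Char} (h : c ∈ Kof xs) :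
    (iOf xs c, c) ∈ PySem.List.enumerate (Kof xs) 0 := by
  obtain ⟨k, hk⟩ := Option.isSome_iff_exists.mp ((PySem.List.index?_isSome_iff (xs := Kof xs) (v := c)).mpr h)
  obtain ⟨hlt, hget, -⟩ := PySem.List.getElem_of_index?_eq_some hk
  have hmem : ((k : Int), c) ∈ PySem.List.enumerate (Kof xs) 0 := by
    rw [PySem.List.mem_enumerate_iff]
    exact ⟨k, hlt, by simp [hget]⟩
  unfold iOf
  rw [hk]
  exact hmem

theorem mem_items_dOf {xs : List Char} {c : Char} (h : c ∈ Kof xs) :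
    (keyOf c, iOf xs c) ∈ (dOf xs).items := by
  have hin : (keyOf c, iOf xs c) ∈ (dOf xs).items := by
    simp only [dOf]
    exact List.mem_map_of_mem (mem_enum_iOf h)
  exact hin

theorem getD_dOf {xs : List Char} {c : Char} (h : c ∈ Kof xs) :
    (dOf xs).getD (keyOf c) 0 = iOf xs c := by
  exact PySem.Dict.getD_of_mem_items _ (mem_items_dOf h) (nodup_keys_dOf xs) 0

theorem Kof_snoc (xs : List Char) (c : Char) :
    Kof (xs ++ [c]) = if fns c then PySem.Set.add (Kof xs) c else Kof xs := by
  simp only [Kof, List.filter_append]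
  by_cases h : fns c
  · simp [h, PySem.Set.ofList_append_singleton]
  · simp [h]

theorem iOf_stable {xs : List Char} {c : Char} (ys : List Char) (h : c ∈ Kof xs) :
    iOf (xs ++ ys) c = iOf xs c := by
  have hK : Kof (xs ++ ys) = Kof xs ++ ((PySem.Set.ofList (ys.filter fns)).filter
      (fun y => !(PySem.Set.contains (Kof xs) y))) := by
    simp only [Kof, List.filter_append, PySem.Set.ofList_append]
    exact PySem.Set.update_eq_append_filter _ _
  simp only [iOf, hK, PySem.List.index?_append_of_mem _ h]

theorem stepA_dOf (p : List Char) (acc : List (List Char)) (c : Char) :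
    stepA (dOf p, acc) c = (dOf (p ++ [c]), acc ++ [gOf (p ++ [c]) c])  := by
  by_cases hc : fns c
  · have hns : c ∉ specA := by simpa [fns] using hc
    by_cases hm : c ∈ Kof p
    · have hK : Kof (p ++ [c]) = Kof p := by
        rw [Kof_snoc, if_pos hc, PySem.Set.add_of_mem hm]
      have hcon2 : (dOf p).contains (String.ofList [c]) = true := by
        rw [show String.ofList [c] = keyOf c from rfl, contains_dOf]; simpa using hm
      have hd : dOf (p ++ [c]) = dOf p := by simp [dOf, hK]
      have getD2 : (dOf p).getD (String.ofList [c]) 0 = iOf p c := getD_dOf hm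
      simp [stepA, hns, hcon2, hd, gOf, hc, iOf_stable [c] hm, getD2]
    · have hK : Kof (p ++ [c]) = Kof p ++ [c] := by
        rw [Kof_snoc, if_pos hc, PySem.Set.add_of_not_mem hm]
      have hcon2 : (dOf p).contains (String.ofList [c]) = false := by
        rw [show String.ofList [c] = keyOf c from rfl, contains_dOf]; simpa using hm
      have hd : (dOf p).insert (String.ofList [c]) (((dOf p).size : Int)) = dOf (p ++ [c]) := by
        apply PySem.Dict.ext
        rw [PySem.Dict.items_insert_of_not_contains]
        · simp [dOf, hK, PySem.List.enumerate_append, PySem.List.enumerate_cons,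
            PySem.List.enumerate_nil, PySem.Dict.size, PySem.List.length_enumerate, keyOf]
        · exact hcon2
      have hmem2 : c ∈ Kof (p ++ [c]) := by rw [hK]; simp
      have getD2 : (dOf (p ++ [c])).getD (String.ofList [c]) 0 = iOf (p ++ [c]) c := getD_dOf hmem2
      simp [stepA, hns, hcon2, hd, gOf, hc, getD2]
  · have hcf : fns c = false := by
      cases hfc : fns c
      · rfl
      · exact absurd hfc hc
    have hs : c ∈ specA := by
      have h2 : specA.contains c = true := by
        cases hsc : specA.contains c
        · exfalso
          have h3 : fns c = true := by rw [fns, hsc]; rfl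
          rw [hcf] at h3
          exact Bool.false_ne_true h3
        · rfl
      simpa using h2
    have hK : Kof (p ++ [c]) = Kof p := by rw [Kof_snoc, if_neg (by simp [hcf])]
    have hd : dOf (p ++ [c]) = dOf p := by simp [dOf, hK]
    simp [stepA, gOf, hs, hd, hcf]

theorem loopA (q p : List Char) (acc : List (List Char)) :
    List.foldl stepA (dOf p, acc) q = (dOf (p ++ q), acc ++ q.map (gOf (p ++ q))) := by
  induction q generalizing p acc with
  | nil => simp
  | cons c q' ih =>
    have hstep := stepA_dOf p acc c
    calc List.foldl stepA (dOf p, acc) (c :: q')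
        = List.foldl stepA (dOf (p ++ [c]), acc ++ [gOf (p ++ [c]) c]) q' := by
          rw [List.foldl_cons, hstep]
      _ = (dOf (p ++ [c] ++ q'), acc ++ [gOf (p ++ [c]) c] ++ q'.map (gOf (p ++ [c] ++ q'))) := ih _ _
      _ = (dOf (p ++ c :: q'), acc ++ (c :: q').map (gOf (p ++ c :: q'))) := by
          have hc1 : gOf (p ++ [c]) c = gOf (p ++ c :: q') c := by
            by_cases hfc : fns c
            · have hm : c ∈ Kof (p ++ [c]) := by
                rw [Kof_snoc, if_pos hfc]
                simp [PySem.Set.mem_add]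
              have : gOf (p ++ [c] ++ q') c = gOf (p ++ [c]) c := by
                simp only [gOf, if_pos hfc, iOf_stable q' hm]
              rw [← this, List.append_assoc]; rfl
            · simp [gOf, fns_false hfc]
          rw [hc1]
          have hq : q'.map (gOf (p ++ [c] ++ q')) = q'.map (gOf (p ++ c :: q')) := by
            apply List.map_congr_left
            intro x _; rw [List.append_assoc]; rfl
          rw [hq, List.append_assoc]
          simp

theorem foldl_concat (l : List (List Char)) (a : List Char) :
    l.foldl (fun x y => x ++ y) a = a ++ l.flatten := by
  induction l generalizing a with
  | nil => simp
  | cons x xs ih => simp [ih, List.append_assoc]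

-- a char of xs has its first-occurrence index below xs.length
theorem idx_lt_of_mem {xs : List Char} {c : Char} (h : c ∈ xs) :
    (PySem.List.index? xs c).getD 0 < xs.length := by
  obtain ⟨k, hk⟩ := Option.isSome_iff_exists.mp ((PySem.List.index?_isSome_iff (xs := xs) (v := c)).mpr h)
  obtain ⟨hlt, -, -⟩ := PySem.List.getElem_of_index?_eq_some hk
  rw [hk]
  simpa using hlt

-- first-appearance order IS ascending first-occurrence-index order
theorem pairwise_idx (xs : List Char) :
    (Kof xs).Pairwise (fun a b =>
      (PySem.List.index? xs a).getD 0 < (PySem.List.index? xs b).getD 0) := by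
  induction xs using List.reverseRecOn with
  | nil => simp [Kof, PySem.Set.ofList_nil]
  | append_singleton xs c ih =>
    have hstable : ∀ a ∈ Kof xs,
        (PySem.List.index? (xs ++ [c]) a).getD 0 = (PySem.List.index? xs a).getD 0 := by
      intro a ha
      have hx : a ∈ xs := by
        have := (PySem.Set.mem_ofList (xs.filter fns) a).mp ha
        exact (List.mem_filter.mp this).1
      rw [PySem.List.index?_append_of_mem _ hx]
    rw [Kof_snoc]
    by_cases hc : fns c
    · rw [if_pos hc]
      by_cases hm : c ∈ Kof xs
      · rw [PySem.Set.add_of_mem hm]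
        exact ih.imp_of_mem (fun {a b} ha hb h => by rw [hstable a ha, hstable b hb]; exact h)
      · rw [PySem.Set.add_of_not_mem hm]
        rw [List.pairwise_append]
        refine ⟨ih.imp_of_mem (fun {a b} ha hb h => by rw [hstable a ha, hstable b hb]; exact h),
          by simp, ?_⟩
        intro a ha b hb
        have hb' : b = c := by simpa using hb
        rw [hb']
        have hcx : c ∉ xs := by
          intro hx
          exact hm ((PySem.Set.mem_ofList (xs.filter fns) c).mpr (List.mem_filter.mpr ⟨hx, hc⟩))
        have hax : a ∈ xs := by
          have := (PySem.Set.mem_ofList (xs.filter fns) a).mp ha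
          exact (List.mem_filter.mp this).1
        rw [hstable a ha, PySem.List.index?_append_singleton_self xs c hcx]
        simpa using idx_lt_of_mem hax
    · rw [if_neg hc]
      exact ih.imp_of_mem (fun {a b} ha hb h => by rw [hstable a ha, hstable b hb]; exact h)

-- the sorted set in B is exactly the first-appearance list Kof
theorem uniq_eq (st : List Char) :
    PySem.List.sorted (PySem.Set.diff (PySem.Set.ofList st) specB)
      (fun c => (PySem.List.index? st c).getD 0) false = Kof st := by
  apply PySem.List.sorted_eq_of_perm_of_pairwise_lt
  · apply (List.perm_ext_iff_of_nodup (PySem.Set.nodup_ofList _)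
      (PySem.Set.nodup_diff _ _ (PySem.Set.nodup_ofList _))).mpr
    intro a
    constructor
    · intro h
      have h2 := (PySem.Set.mem_ofList (st.filter fns) a).mp h
      obtain ⟨hx, hf⟩ := List.mem_filter.mp h2
      refine (PySem.Set.mem_diff _ _ a).mpr ⟨(PySem.Set.mem_ofList st a).mpr hx, ?_⟩
      have hBA : specB = specA := by decide
      rw [hBA]
      simp only [fns, Bool.not_eq_true', List.contains_eq_mem, decide_eq_false_iff_not] at hf
      exact hf
    · intro h
      obtain ⟨hx, hs⟩ := (PySem.Set.mem_diff _ _ a).mp h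
      have hxs := (PySem.Set.mem_ofList st a).mp hx
      have hf : fns a = true := by
        have hBA : specB = specA := by decide
        rw [hBA] at hs
        simp only [fns, Bool.not_eq_true', List.contains_eq_mem, decide_eq_false_iff_not]
        exact hs
      exact (PySem.Set.mem_ofList (st.filter fns) a).mpr (List.mem_filter.mpr ⟨hxs, hf⟩)
  · exact pairwise_idx st

-- B's dict comprehension builds exactly dOf
theorem dictB_eq (st : List Char) :
    (PySem.List.enumerate (Kof st) 0).foldl
      (fun (d : PySem.Dict String Int) p => d.insert (String.ofList [p.2]) p.1) PySem.Dict.empty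
      = dOf st := by
  have hfresh : ∀ a ∈ PySem.List.enumerate (Kof st) 0,
      (PySem.Dict.empty : PySem.Dict String Int).contains (String.ofList [a.2]) = false := by
    intro a _; exact PySem.Dict.contains_empty _
  have hnd : ((PySem.List.enumerate (Kof st) 0).map (fun a => String.ofList [a.2])).Nodup := by
    have h1 : ((PySem.List.enumerate (Kof st) 0).map (·.2)).map (fun c => String.ofList [c])
        = (PySem.List.enumerate (Kof st) 0).map (fun a => String.ofList [a.2]) := by
      rw [List.map_map]; rfl
    rw [← h1, PySem.List.map_snd_enumerate]
    exact (PySem.Set.nodup_ofList _).map (fun a b h => keyOf_inj h)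
  apply PySem.Dict.ext
  have h := PySem.Dict.items_foldl_insert_fresh
      (PySem.List.enumerate (Kof st) 0)
      (fun p => String.ofList [p.2]) (fun p => p.1) PySem.Dict.empty hfresh hnd
  exact h.trans (by rfl)

theorem toNat_inj {a b : Char} (h : a.toNat = b.toNat) : a = b :=
  Char.ext (UInt32.toNat_inj.mp h)

-- the translate table, as an items list
def tOf (st : List Char) : PySem.Dict Nat (List Char) :=
  PySem.Dict.mk ((PySem.List.enumerate (Kof st) 0).map
    (fun p => (p.2.toNat, PySem.Int.toChars p.1)))

theorem transB_eq (st : List Char) :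
    (PySem.List.enumerate (Kof st) 0).foldl
      (fun (d : PySem.Dict Nat (List Char)) p => d.insert p.2.toNat (PySem.Int.toChars p.1))
      PySem.Dict.empty = tOf st := by
  have hfresh : ∀ a ∈ PySem.List.enumerate (Kof st) 0,
      (PySem.Dict.empty : PySem.Dict Nat (List Char)).contains a.2.toNat = false := by
    intro a _; exact PySem.Dict.contains_empty _
  have hnd : ((PySem.List.enumerate (Kof st) 0).map (fun a => a.2.toNat)).Nodup := by
    have h1 : ((PySem.List.enumerate (Kof st) 0).map (·.2)).map Char.toNat
        = (PySem.List.enumerate (Kof st) 0).map (fun a => a.2.toNat) := by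
      rw [List.map_map]; rfl
    rw [← h1, PySem.List.map_snd_enumerate]
    exact (PySem.Set.nodup_ofList _).map (fun a b h => toNat_inj h)
  apply PySem.Dict.ext
  have h := PySem.Dict.items_foldl_insert_fresh
      (PySem.List.enumerate (Kof st) 0)
      (fun p => p.2.toNat) (fun p => PySem.Int.toChars p.1) PySem.Dict.empty hfresh hnd
  exact h.trans (by rfl)

theorem keys_tOf (st : List Char) : (tOf st).keys = (Kof st).map Char.toNat := by
  have h2 : ((PySem.List.enumerate (Kof st) 0).map (·.2)).map Char.toNat
      = (Kof st).map Char.toNat := by rw [PySem.List.map_snd_enumerate]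
  simp only [tOf, PySem.Dict.keys, List.map_map] at *
  simpa using h2

theorem nodup_keys_tOf (st : List Char) : (tOf st).keys.Nodup := by
  rw [keys_tOf]
  exact (PySem.Set.nodup_ofList _).map (fun a b h => toNat_inj h)

-- looking a char up in the translate table gives gOf
theorem getD_tOf (st : List Char) (c : Char) (hin : c ∈ st) :
    (tOf st).getD c.toNat [c] = gOf st c := by
  by_cases hc : fns c
  · by_cases hm : c ∈ Kof st
    · have hitem : (c.toNat, PySem.Int.toChars (iOf st c)) ∈ (tOf st).items := by
        simp only [tOf]
        exact List.mem_map_of_mem (mem_enum_iOf hm)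
      rw [PySem.Dict.getD_of_mem_items _ hitem (nodup_keys_tOf st)]
      simp [gOf, hc]
    · exact absurd ((PySem.Set.mem_ofList (st.filter fns) c).mpr (List.mem_filter.mpr ⟨hin, hc⟩)) hm
  · have hcon : (tOf st).contains c.toNat = false := by
      rw [PySem.Dict.contains_eq_decide_mem_keys, keys_tOf]
      simp only [decide_eq_false_iff_not, List.mem_map, not_exists]
      intro a ha
      obtain ⟨ha1, hn⟩ := ha
      have : a = c := toNat_inj hn
      subst this
      have hf := (List.mem_filter.mp ((PySem.Set.mem_ofList (st.filter fns) a).mp ha1)).2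
      exact hc hf
    rw [PySem.Dict.getD_of_not_contains _ _ hcon]
    simp [gOf, fns_false hc]

-- ===== VERDICT (by name: the statement is the Claim_ definition above) =====
theorem count_spec : Claim_equal_count := by
  intro st0 _
  show count st0 = count_alt st0
  simp only [count, count_alt]
  rw [uniq_eq, dictB_eq, transB_eq]
  have h := loopA st0.toList [] []
  simp only [List.nil_append] at h
  have h0 : (PySem.Dict.empty, ([] : List (List Char))) = (dOf [], []) := by
    simp [dOf, Kof, PySem.List.enumerate_nil, PySem.Dict.empty]
  rw [h0, h, foldl_concat]
  have hmap : st0.toList.map (fun c => (tOf st0.toList).getD c.toNat [c])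
      = st0.toList.map (gOf st0.toList) := by
    apply List.map_congr_left
    intro c hc
    exact getD_tOf st0.toList c hc
  rw [hmap]
  simp
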